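-- pv_equiv track=rewrite | github.com/wyattowalsh/agents | skills/nerdbot/scripts/kb_bootstrap.py | parse_bootstrap_packet_sections
-- ===== SOURCE A (Python) =====
-- PATH_MARKER_PREFIX = "Path: `"
--
-- def finalize_template_section(lines: list[str]) -> str:
--     """Normalize a parsed template section for writing to disk."""
--     return "\n".join(lines).strip() + "\n"
--
-- def parse_bootstrap_packet_sections(packet_text: str) -> dict[str, str]:
--     """Extract file templates from the bootstrap packet asset."""
--     sections: dict[str, str] = {}
--     current_path: str | None = None
--     current_lines: list[str] = []
--     lines = packet_text.splitlines()
--     index = 0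
--     while index < len(lines):
--         line = lines[index]
--         if line.startswith(PATH_MARKER_PREFIX) and line.endswith("`"):
--             if current_path is not None:
--                 sections[current_path] = finalize_template_section(current_lines)
--             current_path = line.removeprefix(PATH_MARKER_PREFIX).removesuffix("`")
--             current_lines = []
--             index += 1
--             while index < len(lines) and not lines[index]:
--                 index += 1
--             continue
--         if current_path is not None:
--             if line == "---":
--                 next_index = index + 1
--                 while next_index < len(lines) and not lines[next_index]:
--                     next_index += 1
--                 if next_index >= len(lines) or lines[next_index].startswith(PATH_MARKER_PREFIX):
--                     sections[current_path] = finalize_template_section(current_lines)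
--                     current_path = None
--                     index = next_index
--                     continue
--             current_lines.append(line)
--         index += 1
--     if current_path is not None:
--         sections[current_path] = finalize_template_section(current_lines)
--     return sections
-- ===== SOURCE B (Python) =====
-- PATH_MARKER_PREFIX = "Path: `"
--
--
-- def parse_bootstrap_packet_sections(packet_text: str) -> dict[str, str]:
--     """Two-phase rewrite: collect marker indices once, then cut each block."""
--     lines = packet_text.splitlines()
--     marks = [i for i, line in enumerate(lines)
--              if line.startswith(PATH_MARKER_PREFIX) and line.endswith("`")]
--     sections: dict[str, str] = {}
--     for k, m in enumerate(marks):
--         end = marks[k + 1] if k + 1 < len(marks) else len(lines)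
--         body = lines[m + 1:end]
--         kept = body
--         for j, line in enumerate(body):
--             if line == "---":
--                 tail = [x for x in body[j + 1:] if x]
--                 if not tail or tail[0].startswith(PATH_MARKER_PREFIX):
--                     kept = body[:j]
--                     break
--         path = lines[m][len(PATH_MARKER_PREFIX):-1]
--         sections[path] = "\n".join(kept).strip() + "\n"
--     return sections
-- ===== Notes on version B (the rewrite author's own statement) =====
-- stated objective: simpler
-- what changed: Replaces A's single stateful index-jumping while loop (current_path/current_lines state machine with inner blank-skip loops) by two passes: collect all marker line indices first, then slice each block between consecutive markers and cut it at the first separator line whose following non-blank body line is absent or starts with the marker prefix.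
import Mathlib
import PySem

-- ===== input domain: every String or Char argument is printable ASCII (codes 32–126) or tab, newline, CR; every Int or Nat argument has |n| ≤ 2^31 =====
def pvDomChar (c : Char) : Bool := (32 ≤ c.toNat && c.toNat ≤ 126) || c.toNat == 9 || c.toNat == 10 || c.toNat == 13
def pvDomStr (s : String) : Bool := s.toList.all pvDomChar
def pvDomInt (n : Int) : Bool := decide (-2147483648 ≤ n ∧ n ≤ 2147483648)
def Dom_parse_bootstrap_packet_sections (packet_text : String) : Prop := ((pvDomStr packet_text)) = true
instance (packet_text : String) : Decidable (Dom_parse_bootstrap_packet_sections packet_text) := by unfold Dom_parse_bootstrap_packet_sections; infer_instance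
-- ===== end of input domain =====

-- B replaces A's single stateful index-jumping while loop by two passes (collect marker
-- indices, then slice and cut each block); objective: simpler decomposition, same cost.

-- ===== PORT A =====

-- module constant PATH_MARKER_PREFIX (shared by both Python versions)
def pvPfx : String := "Path: `"

-- 'line.startswith(PATH_MARKER_PREFIX) and line.endswith("`")' (both Pythons test exactly this)
def pvIsMarker (line : String) : Bool :=
  PySem.Str.startswith line pvPfx && PySem.Str.endswith line "`"

-- finalize_template_section: '"\n".join(lines).strip() + "\n"'; exact: Str.join/Str.strip are
-- String.ofList of the PySem.Chars operations, and '+ "\n"' appends the single char '\n'.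
def pvFinalize (ls : List String) : String :=
  String.ofList (PySem.Chars.strip (PySem.Chars.join ['\n'] (ls.map String.toList)) ++ ['\n'])

-- str.removeprefix / str.removesuffix, ported by hand (exact: drop/take on the code points)
def pvRemoveprefix (s p : String) : String :=
  if PySem.Str.startswith s p then String.ofList (s.toList.drop p.toList.length) else s

def pvRemovesuffix (s p : String) : String :=
  if PySem.Str.endswith s p then String.ofList (s.toList.take (s.toList.length - p.toList.length)) else s

-- the inner 'while index < len(lines) and not lines[index]: index += 1' loops of A
def pvSkipBlank (lines : List String) (index : Nat) : Nat :=
  if h : index < lines.length then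
    if lines[index] = "" then pvSkipBlank lines (index + 1) else index
  else index
termination_by lines.length - index
decreasing_by exact Nat.sub_succ_lt_self _ _ h

-- needed by pvLoopA's termination proof
theorem pvSkipBlank_ge (lines : List String) (index : Nat) : index ≤ pvSkipBlank lines index := by
  fun_induction pvSkipBlank <;> omega

-- A's outer while loop, state = (index, sections, current_path, current_lines).
-- Python's 'if line == "---": next_index = …; if cond: close' is one conditional here (same
-- result; next_index recomputed, same value); 'lines[next_index]' is guarded by the
-- 'next_index >= len' disjunct in Python, so getD with default "" is exact.
def pvLoopA (lines : List String) (index : Nat) (sections : PySem.Dict String String)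
    (currentPath : Option String) (currentLines : List String) : PySem.Dict String String :=
  if h : index < lines.length then
    if pvIsMarker lines[index] then
      pvLoopA lines (pvSkipBlank lines (index + 1))
        (match currentPath with
         | some p => sections.insert p (pvFinalize currentLines)
         | none => sections)
        (some (pvRemovesuffix (pvRemoveprefix lines[index] pvPfx) "`")) []
    else
      match currentPath with
      | some p =>
        if lines[index] = "---" ∧ (lines.length ≤ pvSkipBlank lines (index + 1) ∨
            PySem.Str.startswith (lines.getD (pvSkipBlank lines (index + 1)) "") pvPfx = true) then
          pvLoopA lines (pvSkipBlank lines (index + 1))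
            (sections.insert p (pvFinalize currentLines)) none currentLines
        else
          pvLoopA lines (index + 1) sections (some p) (currentLines ++ [lines[index]])
      | none => pvLoopA lines (index + 1) sections none currentLines
  else
    match currentPath with
    | some p => sections.insert p (pvFinalize currentLines)
    | none => sections
termination_by lines.length - index
decreasing_by
  all_goals first
    | exact Nat.sub_succ_lt_self _ _ h
    | exact Nat.sub_lt_sub_left h
        (Nat.lt_of_lt_of_le (Nat.lt_succ_self _) (pvSkipBlank_ge lines (index + 1)))

def parse_bootstrap_packet_sections (packet_text : String) : List (String × String) :=
  (pvLoopA (PySem.Str.splitlines packet_text) 0 PySem.Dict.empty none []).items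

-- ===== PORT B =====

-- 'tail = [x for x in body[j+1:] if x]; not tail or tail[0].startswith(PATH_MARKER_PREFIX)'
def pvCloses (tail : List String) : Bool :=
  match tail.filter (fun x => x ≠ "") with
  | [] => true
  | x :: _ => PySem.Str.startswith x pvPfx

-- the inner 'for j, line in enumerate(body)' scan: body[:j] for the first closing '---', else body
def pvCut : List String → List String
  | [] => []
  | line :: rest => if line = "---" ∧ pvCloses rest = true then [] else line :: pvCut rest

-- '[i for i, line in enumerate(lines) if line.startswith(…) and line.endswith("`")]'
def pvMarks (lines : List String) : List Nat :=
  (List.range lines.length).filter (fun i => pvIsMarker (lines.getD i ""))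

-- the 'for k, m in enumerate(marks)' loop; end = next mark or len(lines);
-- path = lines[m][len(PATH_MARKER_PREFIX):-1]  (len(PATH_MARKER_PREFIX) = 7)
def pvGoB (lines : List String) : List Nat → PySem.Dict String String → PySem.Dict String String
  | [], sections => sections
  | m :: ms, sections =>
    let endi : Nat := match ms with | m2 :: _ => m2 | [] => lines.length
    let body := PySem.List.slice lines (some ((m : Int) + 1)) (some (endi : Int))
    let path := PySem.Str.slice (lines.getD m "") (some 7) (some (-1))
    pvGoB lines ms (sections.insert path (pvFinalize (pvCut body)))

def parse_bootstrap_packet_sections_alt (packet_text : String) : List (String × String) :=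
  let lines := PySem.Str.splitlines packet_text
  (pvGoB lines (pvMarks lines) PySem.Dict.empty).items

-- ===== PRECONDITION & SPEC =====
def Spec_parse_bootstrap_packet_sections (packet_text : String) (out : List (String × String)) : Prop := out = parse_bootstrap_packet_sections_alt packet_text
instance (packet_text : String) (out : List (String × String)) : Decidable (Spec_parse_bootstrap_packet_sections packet_text out) := by unfold Spec_parse_bootstrap_packet_sections; infer_instance

-- ===== CLAIM (what is proved, stated in full; the proofs are below) =====
def Claim_equal_parse_bootstrap_packet_sections : Prop := ∀ (packet_text : String), Dom_parse_bootstrap_packet_sections packet_text → Spec_parse_bootstrap_packet_sections packet_text (parse_bootstrap_packet_sections packet_text)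

-- ===== LEMMAS AND PROOFS =====

-- the marker indices ≥ i, the next marker index ≥ i (or len), and the block lines[i : next]
def pvMarksFrom (lines : List String) (i : Nat) : List Nat :=
  (List.range' i (lines.length - i)).filter (fun j => pvIsMarker (lines.getD j ""))

def pvNext (lines : List String) (i : Nat) : Nat := (pvMarksFrom lines i).headD lines.length

def pvSeg (lines : List String) (i : Nat) : List String :=
  (lines.drop i).take (pvNext lines i - i)

theorem pvMarksFrom_stop {lines : List String} {i : Nat} (h : lines.length ≤ i) :
    pvMarksFrom lines i = [] := by
  unfold pvMarksFrom
  have : lines.length - i = 0 := by omega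
  rw [this]
  rfl

theorem pvMarksFrom_succ {lines : List String} {i : Nat} (h : i < lines.length) :
    pvMarksFrom lines i =
      if pvIsMarker (lines.getD i "") then i :: pvMarksFrom lines (i + 1)
      else pvMarksFrom lines (i + 1) := by
  unfold pvMarksFrom
  have h1 : lines.length - i = (lines.length - (i + 1)) + 1 := by omega
  rw [h1, List.range'_succ, List.filter_cons]

theorem pvMem_marksFrom {lines : List String} {i j : Nat} (h : j ∈ pvMarksFrom lines i) :
    i ≤ j ∧ j < lines.length ∧ pvIsMarker (lines.getD j "") = true := by
  unfold pvMarksFrom at h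
  rw [List.mem_filter, List.mem_range'_1] at h
  exact ⟨h.1.1, by omega, h.2⟩

theorem pvNext_min {lines : List String} {i j : Nat} (h : j ∈ pvMarksFrom lines i) :
    pvNext lines i ≤ j := by
  cases hm : pvMarksFrom lines i with
  | nil => rw [hm] at h; cases h
  | cons a t =>
    have hp : List.Pairwise (· < ·) (a :: t) := by
      rw [← hm]
      unfold pvMarksFrom
      exact (List.pairwise_lt_range' (s := i) (n := lines.length - i) 1).filter _
    rw [hm] at h
    unfold pvNext
    rw [hm]
    rcases List.mem_cons.mp h with rfl | h2
    · simp
    · have := (List.pairwise_cons.mp hp).1 j h2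
      simp
      omega

theorem pvNext_ge {lines : List String} {i : Nat} (h : i ≤ lines.length) :
    i ≤ pvNext lines i := by
  unfold pvNext
  cases hm : pvMarksFrom lines i with
  | nil => simpa
  | cons a t =>
    have := pvMem_marksFrom (lines := lines) (i := i) (j := a) (by rw [hm]; simp)
    simpa using this.1

theorem pvNext_le {lines : List String} (i : Nat) : pvNext lines i ≤ lines.length := by
  unfold pvNext
  cases hm : pvMarksFrom lines i with
  | nil => simp
  | cons a t =>
    have := pvMem_marksFrom (lines := lines) (i := i) (j := a) (by rw [hm]; simp)
    have h2 := this.2.1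
    simp
    omega

theorem pvNext_marker {lines : List String} {i : Nat} (h : pvNext lines i < lines.length) :
    pvIsMarker (lines.getD (pvNext lines i) "") = true := by
  cases hm : pvMarksFrom lines i with
  | nil =>
    exfalso
    unfold pvNext at h
    rw [hm] at h
    simp at h
  | cons a t =>
    have hmem := pvMem_marksFrom (lines := lines) (i := i) (j := a) (by rw [hm]; simp)
    unfold pvNext
    rw [hm]
    simpa using hmem.2.2

-- the next marker seen from i, when lines[i] is not a marker
theorem pvNext_skip {lines : List String} {i : Nat} (h : i < lines.length)
    (hm : pvIsMarker (lines.getD i "") = false) : pvNext lines i = pvNext lines (i + 1) := by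
  unfold pvNext
  rw [pvMarksFrom_succ h, hm]
  simp

theorem pvSeg_cons {lines : List String} {i : Nat} (h : i < lines.length)
    (hm : pvIsMarker (lines.getD i "") = false) :
    pvSeg lines i = lines.getD i "" :: pvSeg lines (i + 1) := by
  have hn : pvNext lines i = pvNext lines (i + 1) := pvNext_skip h hm
  have h2 : i + 1 ≤ pvNext lines (i + 1) := pvNext_ge (by omega)
  unfold pvSeg
  rw [hn, List.drop_eq_getElem_cons h]
  have h3 : pvNext lines (i + 1) - i = (pvNext lines (i + 1) - (i + 1)) + 1 := by omega
  rw [h3, List.take_succ_cons, List.getD_eq_getElem lines "" h]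

theorem pvSeg_marker {lines : List String} {i : Nat} (h : i < lines.length)
    (hm : pvIsMarker (lines.getD i "") = true) : pvSeg lines i = [] := by
  have hn : pvNext lines i = i := by
    unfold pvNext
    rw [pvMarksFrom_succ h, if_pos hm]
    rfl
  unfold pvSeg
  rw [hn]
  simp

-- skipBlank facts
theorem pvSkipBlank_le {lines : List String} {i : Nat} (h : i ≤ lines.length) :
    pvSkipBlank lines i ≤ lines.length := by
  fun_induction pvSkipBlank <;> omega

theorem pvSkipBlank_blank {lines : List String} (i : Nat) :
    ∀ j, i ≤ j → j < pvSkipBlank lines i → lines.getD j "" = "" := by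
  fun_induction pvSkipBlank with
  | case1 i h hb ih =>
    intro j hij hj
    rcases Nat.eq_or_lt_of_le hij with rfl | hlt
    · rw [List.getD_eq_getElem lines "" h]; exact hb
    · exact ih j hlt hj
  | case2 i h hb => intro j hij hj; omega
  | case3 i h => intro j hij hj; omega

theorem pvSkipBlank_stop {lines : List String} {i : Nat}
    (h : pvSkipBlank lines i < lines.length) : lines.getD (pvSkipBlank lines i) "" ≠ "" := by
  fun_induction pvSkipBlank with
  | case1 i h2 hb ih => exact ih h
  | case2 i h2 hb => rw [List.getD_eq_getElem lines "" h2]; exact hb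
  | case3 i h2 => omega

-- one blank step: everything seen from i equals everything seen from i+1
theorem pvStrip_newline_cons (l : List Char) :
    PySem.Chars.strip ('\n' :: l) = PySem.Chars.strip l := by
  simp [PySem.Chars.strip, PySem.Chars.lstrip, show PySem.Chars.isspace '\n' = true from by decide]

theorem pvFinalize_blank_cons (xs : List String) : pvFinalize ("" :: xs) = pvFinalize xs := by
  cases xs with
  | nil => decide
  | cons y t =>
    unfold pvFinalize
    rw [List.map_cons, List.map_cons, show String.toList "" = [] from by decide,
      PySem.Chars.join_cons_cons]
    rw [show ([] : List Char) ++ ['\n'] ++ PySem.Chars.join ['\n'] (y.toList :: t.map String.toList)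
        = '\n' :: PySem.Chars.join ['\n'] (y.toList :: t.map String.toList) from by simp]
    rw [pvStrip_newline_cons]

theorem pvCut_blank_cons (xs : List String) : pvCut ("" :: xs) = "" :: pvCut xs := by
  rw [pvCut, if_neg]
  rintro ⟨h1, -⟩
  exact absurd h1 (by decide)

theorem pvCloses_blank_cons (xs : List String) : pvCloses ("" :: xs) = pvCloses xs := by
  unfold pvCloses
  rw [List.filter_cons, if_neg (by simp)]

-- iterated to skipBlank
theorem pvBlankRange' (lines : List String) : ∀ d i, i + d ≤ lines.length →
    (∀ j, i ≤ j → j < i + d → lines.getD j "" = "") →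
    pvMarksFrom lines i = pvMarksFrom lines (i + d) ∧
    pvFinalize (pvCut (pvSeg lines i)) = pvFinalize (pvCut (pvSeg lines (i + d))) ∧
    pvCloses (pvSeg lines i) = pvCloses (pvSeg lines (i + d)) := by
  intro d
  induction d with
  | zero => intro i _ _; simp
  | succ d ih =>
    intro i hk hb
    have h0 : i < lines.length := by omega
    have hbi : lines.getD i "" = "" := hb i le_rfl (by omega)
    have hm : pvIsMarker (lines.getD i "") = false := by rw [hbi]; decide
    have e1 : pvMarksFrom lines i = pvMarksFrom lines (i + 1) := by
      rw [pvMarksFrom_succ h0, hm]; simp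
    have e2 : pvSeg lines i = "" :: pvSeg lines (i + 1) := by
      rw [pvSeg_cons h0 hm, hbi]
    have ih' := ih (i + 1) (by omega) (fun j hj1 hj2 => hb j (by omega) (by omega))
    have hkk : i + 1 + d = i + (d + 1) := by omega
    rw [hkk] at ih'
    refine ⟨e1.trans ih'.1, ?_, ?_⟩
    · rw [e2, pvCut_blank_cons, pvFinalize_blank_cons]; exact ih'.2.1
    · rw [e2, pvCloses_blank_cons]; exact ih'.2.2

theorem pvBlankRange {lines : List String} {i k : Nat} (hik : i ≤ k) (hk : k ≤ lines.length)
    (hb : ∀ j, i ≤ j → j < k → lines.getD j "" = "") :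
    pvMarksFrom lines i = pvMarksFrom lines k ∧
    pvFinalize (pvCut (pvSeg lines i)) = pvFinalize (pvCut (pvSeg lines k)) ∧
    pvCloses (pvSeg lines i) = pvCloses (pvSeg lines k) := by
  obtain ⟨d, rfl⟩ : ∃ d, k = i + d := ⟨k - i, by omega⟩
  exact pvBlankRange' lines d i hk hb

-- the closing test of A ('next non-blank line is absent or starts with the prefix') agrees
-- with B's pvCloses applied to the remaining block
theorem pvCloseEquiv {lines : List String} {i : Nat} (h : i < lines.length) :
    ((lines.length ≤ pvSkipBlank lines (i + 1) ∨
      PySem.Str.startswith (lines.getD (pvSkipBlank lines (i + 1)) "") pvPfx = true)) ↔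
    pvCloses (pvSeg lines (i + 1)) = true := by
  set ni := pvSkipBlank lines (i + 1) with hni
  have h1 : i + 1 ≤ lines.length := h
  have hni1 : i + 1 ≤ ni := pvSkipBlank_ge lines (i + 1)
  have hni2 : ni ≤ lines.length := pvSkipBlank_le h1
  have hblanks : ∀ j, i + 1 ≤ j → j < ni → lines.getD j "" = "" := pvSkipBlank_blank (i + 1)
  have he1 : i + 1 ≤ pvNext lines (i + 1) := pvNext_ge h1
  have he2 : pvNext lines (i + 1) ≤ lines.length := pvNext_le (i + 1)
  have hpack := pvBlankRange hni1 hni2 hblanks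
  have hnexteq : pvNext lines (i + 1) = pvNext lines ni := by
    unfold pvNext; rw [hpack.1]
  have hne : ni ≤ pvNext lines (i + 1) := by
    by_contra hlt0
    have hlt : pvNext lines (i + 1) < ni := by omega
    have hblank := hblanks _ he1 hlt
    have hmk : pvIsMarker (lines.getD (pvNext lines (i + 1)) "") = true :=
      pvNext_marker (by omega)
    rw [hblank] at hmk
    exact absurd hmk (by decide)
  rw [hpack.2.2]
  rcases Nat.eq_or_lt_of_le hne with heq | hlt
  · -- all of the block is blank: both sides true
    have hsegnil : pvSeg lines ni = [] := by
      unfold pvSeg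
      rw [← hnexteq, ← heq]
      simp
    rw [hsegnil]
    simp only [show pvCloses [] = true from rfl, iff_true]
    by_cases hl : lines.length ≤ ni
    · exact Or.inl hl
    · right
      have hmk : pvIsMarker (lines.getD ni "") = true := by
        have := pvNext_marker (lines := lines) (i := i + 1) (by omega)
        rwa [← heq] at this
      have hmk2 : PySem.Str.startswith (lines.getD ni "") pvPfx = true ∧
          PySem.Str.endswith (lines.getD ni "") "`" = true := by
        simpa [pvIsMarker] using hmk
      exact hmk2.1
  · -- first non-blank line of the block is lines[ni]
    have hnl : ni < lines.length := by omega
    have hnib : lines.getD ni "" ≠ "" := pvSkipBlank_stop (by omega)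
    have hmkni : pvIsMarker (lines.getD ni "") = false := by
      by_contra hmk
      rw [Bool.not_eq_false] at hmk
      have hmem : ni ∈ pvMarksFrom lines (i + 1) := by
        rw [hpack.1, pvMarksFrom_succ hnl, hmk]
        simp
      have := pvNext_min hmem
      omega
    have hsegcons : pvSeg lines ni = lines.getD ni "" :: pvSeg lines (ni + 1) :=
      pvSeg_cons hnl hmkni
    rw [hsegcons]
    unfold pvCloses
    rw [List.filter_cons, if_pos (by simpa using hnib)]
    simp only [Nat.not_le.mpr hnl, false_or]

-- the two path computations agree on marker lines
theorem pvPathEq {l : String} (h : pvIsMarker l = true) :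
    pvRemovesuffix (pvRemoveprefix l pvPfx) "`" = PySem.Str.slice l (some 7) (some (-1)) := by
  have hsw : PySem.Str.startswith l pvPfx = true ∧ PySem.Str.endswith l "`" = true := by
    simpa [pvIsMarker] using h
  have hpre : pvPfx.toList <+: l.toList := by
    rw [PySem.Str.startswith_eq] at hsw
    exact (PySem.Chars.startswith_iff _ _).mp hsw.1
  have hsuf : ("`").toList <:+ l.toList := by
    have := hsw.2
    rw [PySem.Str.endswith_eq] at this
    exact (PySem.Chars.endswith_iff _ _).mp this
  have h7 : pvPfx.toList.length = 7 := by decide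
  have hn7 : 7 ≤ l.toList.length := by
    have := hpre.length_le
    omega
  rw [pvRemoveprefix, if_pos hsw.1, h7]
  have hslice : PySem.Str.slice l (some 7) (some (-1))
      = String.ofList ((l.toList.drop 7).take (l.toList.length - 1 - 7)) := by
    rw [PySem.Str.slice]
    congr 1
    rw [PySem.Chars.slice_eq_listSlice]
    simp only [PySem.List.slice]
    rw [PySem.List.clampIdx_neg_one]
    rw [show (7 : Int) = ((7 : Nat) : Int) from by norm_num, PySem.List.clampIdx_natCast]
    rw [Nat.min_eq_left hn7]
  rw [hslice, pvRemovesuffix]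
  simp only [String.toList_ofList]
  by_cases hr : l.toList.drop 7 = []
  · have hlen : l.toList.length = 7 := by
      have := List.drop_eq_nil_iff.mp hr
      omega
    rw [if_neg, hr]
    · simp
    · intro hend
      rw [PySem.Str.endswith_eq, String.toList_ofList, hr] at hend
      have := (PySem.Chars.endswith_iff _ _).mp hend
      have h1 := this.length_le
      simp at h1
  · have hrsuf : ("`").toList <:+ l.toList.drop 7 :=
      List.suffix_of_suffix_length_le hsuf (List.drop_suffix 7 l.toList)
        (by
          have : 0 < (l.toList.drop 7).length := List.length_pos_iff.mpr hr
          simp only [show ("`").toList.length = 1 from by decide]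
          omega)
    rw [if_pos]
    · congr 2
      simp only [show ("`").toList.length = 1 from by decide, List.length_drop]
      omega
    · rw [PySem.Str.endswith_eq, String.toList_ofList]
      exact (PySem.Chars.endswith_iff _ _).mpr hrsuf

-- base case of the main invariant: the loop has run off the end of the line list
theorem pvMainStop (lines : List String) {i : Nat} (hlen : lines.length ≤ i)
    (s : PySem.Dict String String) (cl : List String) (cur : Option String) :
    pvLoopA lines i s cur cl =
      pvGoB lines (pvMarksFrom lines i)
        (match cur with
         | none => s
         | some p => s.insert p (pvFinalize (cl ++ pvCut (pvSeg lines i)))) := by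
  have hseg : pvSeg lines i = [] := by
    unfold pvSeg
    rw [List.drop_eq_nil_iff.mpr hlen]
    simp
  rw [pvLoopA.eq_def, dif_neg (by omega), pvMarksFrom_stop hlen, hseg]
  cases cur <;> simp [pvGoB, pvCut]

-- main invariant: A's loop from index i equals B's fold over the markers ≥ i, with the open
-- section (if any) closed with the lines accumulated so far plus the cut rest of its block
theorem pvMain (lines : List String) : ∀ N i, lines.length - i ≤ N →
    ∀ (s : PySem.Dict String String) (cl : List String) (cur : Option String),
    pvLoopA lines i s cur cl =
      pvGoB lines (pvMarksFrom lines i)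
        (match cur with
         | none => s
         | some p => s.insert p (pvFinalize (cl ++ pvCut (pvSeg lines i)))) := by
  intro N
  induction N with
  | zero =>
    intro i hi s cl cur
    exact pvMainStop lines (by omega) s cl cur
  | succ N ih =>
    intro i hi s cl cur
    by_cases h : i < lines.length
    · have hgd : lines.getD i "" = lines[i] := List.getD_eq_getElem lines "" h
      by_cases hm : pvIsMarker lines[i] = true
      · -- marker line: close the open section (if any), open a new one
        have hmg : pvIsMarker (lines.getD i "") = true := by rw [hgd]; exact hm
        have hmarks : pvMarksFrom lines i = i :: pvMarksFrom lines (i + 1) := by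
          rw [pvMarksFrom_succ h, if_pos hmg]
        have hseg0 : pvSeg lines i = [] := pvSeg_marker h hmg
        set i' := pvSkipBlank lines (i + 1) with hi'
        have hge : i + 1 ≤ i' := pvSkipBlank_ge lines (i + 1)
        have hle : i' ≤ lines.length := pvSkipBlank_le h
        have hpack := pvBlankRange hge hle (pvSkipBlank_blank (i + 1))
        have hendi : (match pvMarksFrom lines (i + 1) with
            | m2 :: _ => m2 | [] => lines.length) = pvNext lines (i + 1) := by
          unfold pvNext
          cases pvMarksFrom lines (i + 1) <;> rfl
        have hbody : PySem.List.slice lines (some ((i : Int) + 1)) (some ((pvNext lines (i + 1) : Nat) : Int))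
            = pvSeg lines (i + 1) := by
          rw [show ((i : Int) + 1) = (((i + 1 : Nat) : Int)) from by push_cast; ring,
            PySem.List.slice_natCast]
          rfl
        rw [pvLoopA.eq_def, dif_pos h, if_pos hm]
        rw [hmarks]
        cases cur with
        | none =>
          rw [ih i' (by omega) s [] (some (pvRemovesuffix (pvRemoveprefix lines[i] pvPfx) "`"))]
          simp only [pvGoB, hendi, hbody]
          rw [← hpack.1, pvPathEq hm, hgd]
          simp [hpack.2.1]
        | some p =>
          rw [ih i' (by omega) (s.insert p (pvFinalize cl)) []
            (some (pvRemovesuffix (pvRemoveprefix lines[i] pvPfx) "`"))]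
          simp only [pvGoB, hendi, hbody]
          rw [← hpack.1, hseg0, pvPathEq hm, hgd]
          simp [hpack.2.1, show pvCut ([] : List String) = [] from rfl]
      · -- not a marker line
        have hmg : pvIsMarker (lines.getD i "") = false := by
          rw [hgd]; exact Bool.not_eq_true _ ▸ (by simpa using hm)
        have hmarks : pvMarksFrom lines i = pvMarksFrom lines (i + 1) := by
          rw [pvMarksFrom_succ h, hmg]; simp
        have hsegc : pvSeg lines i = lines[i] :: pvSeg lines (i + 1) := by
          rw [pvSeg_cons h hmg, hgd]
        cases cur with
        | none =>
          rw [pvLoopA.eq_def, dif_pos h, if_neg (by simpa using hm)]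
          simp only []
          rw [ih (i + 1) (by omega) s cl none, hmarks]
        | some p =>
          rw [pvLoopA.eq_def, dif_pos h, if_neg (by simpa using hm)]
          simp only []
          by_cases hc : lines[i] = "---" ∧ (lines.length ≤ pvSkipBlank lines (i + 1) ∨
              PySem.Str.startswith (lines.getD (pvSkipBlank lines (i + 1)) "") pvPfx = true)
          · -- the '---' closes the open section here
            rw [if_pos hc]
            set ni := pvSkipBlank lines (i + 1) with hni
            have hge : i + 1 ≤ ni := pvSkipBlank_ge lines (i + 1)
            have hle : ni ≤ lines.length := pvSkipBlank_le h
            have hpack := pvBlankRange hge hle (pvSkipBlank_blank (i + 1))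
            have hcloses : pvCloses (pvSeg lines (i + 1)) = true := (pvCloseEquiv h).mp hc.2
            have hcut : pvCut (pvSeg lines i) = [] := by
              rw [hsegc, hc.1, pvCut, if_pos ⟨rfl, hcloses⟩]
            rw [ih ni (by omega) (s.insert p (pvFinalize cl)) cl none]
            rw [hmarks, hpack.1, hcut]
            simp
          · -- ordinary body line: append it
            rw [if_neg hc]
            have hcut : pvCut (pvSeg lines i) = lines[i] :: pvCut (pvSeg lines (i + 1)) := by
              rw [hsegc, pvCut, if_neg]
              intro hboth
              exact hc ⟨hboth.1, (pvCloseEquiv h).mpr hboth.2⟩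
            rw [ih (i + 1) (by omega) s (cl ++ [lines[i]]) (some p)]
            rw [hmarks, hcut]
            simp
    · exact pvMainStop lines (by omega) s cl cur

-- ===== VERDICT (by name: the statement is the Claim_ definition above) =====
theorem parse_bootstrap_packet_sections_spec : Claim_equal_parse_bootstrap_packet_sections := by
  intro packet_text _
  unfold Spec_parse_bootstrap_packet_sections
  show (pvLoopA (PySem.Str.splitlines packet_text) 0 PySem.Dict.empty none []).items
      = (pvGoB (PySem.Str.splitlines packet_text)
          (pvMarks (PySem.Str.splitlines packet_text)) PySem.Dict.empty).items
  have hmarks : pvMarks (PySem.Str.splitlines packet_text)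
      = pvMarksFrom (PySem.Str.splitlines packet_text) 0 := by
    unfold pvMarks pvMarksFrom
    rw [List.range_eq_range']
    simp
  rw [pvMain (PySem.Str.splitlines packet_text) (PySem.Str.splitlines packet_text).length 0
    (by omega) PySem.Dict.empty [] none, hmarks]
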